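-- pv_equiv track=rewrite | github.com/Searle/AdventOfCode | 2021/15/aoc15_2.py | expandInput
-- ===== SOURCE A (Python) =====
-- def expandInput(input):
--     width = len(input[0])
--     lookup = {'1': '2', '2': '3', '3': '4', '4': '5',
--               '5': '6', '6': '7', '7': '8', '8': '9', '9': '1'}
--     nextInput = []
--     for i in input:
--         for x in range(width * 4):
--             i += lookup[i[x]]
--         nextInput.append(i)
--     for y in range(width * 4):
--         i = ""
--         for x in range(width * 5):
--             i += lookup[nextInput[y][x]]
--         nextInput.append(i)
--
--     return nextInput
-- ===== SOURCE B (Python) =====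
-- def expandInput(input):
--     h = len(input)
--     w = len(input[0])
--     digits = "123456789"
--     out = []
--     for m in range(h + 4 * w):
--         src = input[m % h]
--         out.append("".join(digits[(digits.index(src[p % w]) + m // h + p // w) % 9]
--                            for p in range(5 * w)))
--     return out
-- ===== Notes on version B (the rewrite author's own statement) =====
-- stated objective: simpler
-- what changed: B computes each output cell directly from the original grid by modular tile arithmetic (digits[(index + row_tile + col_tile) % 9]) in one pass, instead of A's self-referential chained string building that appends characters read back from the string/list being built.
-- outside the precondition, e.g. on expandInput(['', '9']): A returns ['', '9'], B returns ['', '']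
import Mathlib
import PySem

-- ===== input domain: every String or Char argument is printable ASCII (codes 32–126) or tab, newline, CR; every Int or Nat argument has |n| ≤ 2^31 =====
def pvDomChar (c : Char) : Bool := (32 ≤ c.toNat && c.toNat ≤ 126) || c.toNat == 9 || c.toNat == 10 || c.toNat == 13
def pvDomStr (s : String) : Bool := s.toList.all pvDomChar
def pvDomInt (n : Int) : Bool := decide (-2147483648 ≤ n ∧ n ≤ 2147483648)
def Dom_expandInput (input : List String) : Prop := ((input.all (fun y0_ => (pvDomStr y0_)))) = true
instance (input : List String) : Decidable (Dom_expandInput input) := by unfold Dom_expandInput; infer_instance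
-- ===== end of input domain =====

-- B replaces A's self-referential chained string building by direct per-cell modular tile
-- arithmetic on the original grid (objective: simpler).

-- ===== PORT A =====
def lookupA : PySem.Dict Char Char :=
  PySem.Dict.ofList [('1','2'),('2','3'),('3','4'),('4','5'),('5','6'),('6','7'),('7','8'),('8','9'),('9','1')]

-- the inner 'for x in range(width*4): i += lookup[i[x]]' loop of A
def growRowA (width : Nat) (i : List Char) : List Char :=
  (PySem.List.pyRange 0 ((width : Int) * 4) 1).foldl
    (fun acc x => acc ++ [lookupA.getD (PySem.List.pyGetD acc x ' ') ' ']) i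

def expandInput (input : List String) : List String :=
  let rows := input.map String.toList
  let width := (PySem.List.pyGetD rows 0 []).length
  let next1 := rows.foldl (fun acc i => acc ++ [growRowA width i]) []
  let next2 := (PySem.List.pyRange 0 ((width : Int) * 4) 1).foldl
    (fun acc y => acc ++
      [(PySem.List.pyRange 0 ((width : Int) * 5) 1).foldl
        (fun i x => i ++ [lookupA.getD (PySem.List.pyGetD (PySem.List.pyGetD acc y []) x ' ') ' ']) []])
    next1
  next2.map (fun r => String.ofList r)

-- ===== PORT B =====
def pvDigits : List Char := ['1','2','3','4','5','6','7','8','9']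

def expandInput_alt (input : List String) : List String :=
  let h := input.length
  let w := (PySem.List.pyGetD input 0 "").toList.length
  (PySem.List.pyRange 0 ((h : Int) + 4 * (w : Int)) 1).map (fun m =>
    let src := (PySem.List.pyGetD input (PySem.Int.mod m (h : Int)) "").toList
    String.ofList ((PySem.List.pyRange 0 (5 * (w : Int)) 1).map (fun p =>
      PySem.List.pyGetD pvDigits
        (PySem.Int.mod
          ((((PySem.List.index? pvDigits
                (PySem.List.pyGetD src (PySem.Int.mod p (w : Int)) ' ')).getD 0 : Nat) : Int)
            + PySem.Int.floordiv m (h : Int) + PySem.Int.floordiv p (w : Int)) 9) ' ')))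

-- ===== PRECONDITION & SPEC =====
-- Pre_ excludes inputs where A raises (empty input: IndexError; chars outside '1'..'9': KeyError;
-- rows shorter than row 0: IndexError) and non-rectangular inputs where A's returned value is a
-- defensible-corner artefact of its self-referential append (rows longer than row 0, and a
-- width-0 first row followed by nonempty rows, where A returns the input verbatim).
def Pre_expandInput (input : List String) : Prop :=
  input ≠ [] ∧ (input.all (fun s =>
    s.toList.length == (PySem.List.pyGetD input 0 "").toList.length
    && s.toList.all (fun c => pvDigits.contains c))) = true
instance (input : List String) : Decidable (Pre_expandInput input) := by
  unfold Pre_expandInput; infer_instance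

def pvWitness_expandInput : List String := ["12", "34"]

def Spec_expandInput (input : List String) (out : List String) : Prop := out = expandInput_alt input
instance (input : List String) (out : List String) : Decidable (Spec_expandInput input out) := by
  unfold Spec_expandInput; infer_instance

-- ===== CLAIM (what is proved, stated in full; the proofs are below) =====
def Claim_equal_expandInput : Prop := ∀ (input : List String),
  Dom_expandInput input → Pre_expandInput input → Spec_expandInput input (expandInput input)

-- ===== LEMMAS AND PROOFS =====

-- proof-side vocabulary: the digit wheel and the canonical value of every output cell
def DIG (j : Nat) : Char := pvDigits.getD (j % 9) ' '
def idx9 (c : Char) : Nat := (PySem.List.index? pvDigits c).getD 0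
def rotA (c : Char) : Char := lookupA.getD c ' '
def rowS (rows0 : List (List Char)) (h w m : Nat) : List Char :=
  (List.range (5 * w)).map (fun p =>
    DIG (idx9 ((rows0.getD (m % h) []).getD (p % w) ' ') + m / h + p / w))

-- unpack the Bool-valued precondition into the propositional facts the proof uses
lemma pre_unfold (input : List String) (hpre : Pre_expandInput input) :
    input ≠ [] ∧ ∀ s ∈ input,
      s.toList.length = (PySem.List.pyGetD input 0 "").toList.length ∧
      ∀ c ∈ s.toList, c ∈ pvDigits := by
  obtain ⟨h1, h2⟩ := hpre
  refine ⟨h1, fun s hs => ?_⟩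
  have hsall := List.all_eq_true.mp h2 s hs
  simp only [Bool.and_eq_true, beq_iff_eq] at hsall
  refine ⟨hsall.1, fun c hc => ?_⟩
  have := List.all_eq_true.mp hsall.2 c hc
  simpa using this

lemma rot_aux : ∀ r < 9, rotA (pvDigits.getD r ' ') = pvDigits.getD ((r + 1) % 9) ' ' := by
  intro r hr; interval_cases r <;> decide

lemma rot_step (j : Nat) : rotA (DIG j) = DIG (j + 1) := by
  unfold DIG
  have h9 : j % 9 < 9 := Nat.mod_lt _ (by omega)
  rw [rot_aux (j % 9) h9]
  congr 1
  omega

lemma dig_idx (c : Char) (hc : c ∈ pvDigits) : DIG (idx9 c) = c := by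
  fin_cases hc <;> decide

-- the self-referential append loop 'acc += f(acc[k])' generates the stream S
lemma chain_foldl {α : Type} (d : α) (f : α → α) (S : Nat → α) (w : Nat) (hw : 0 < w)
    (hS : ∀ p, f (S p) = S (p + w)) :
    ∀ t, (List.range t).foldl (fun acc k => acc ++ [f (acc.getD k d)]) ((List.range w).map S)
      = (List.range (w + t)).map S := by
  intro t
  induction t with
  | zero => simp
  | succ t ih =>
    rw [List.range_succ, List.foldl_append]
    simp only [List.foldl_cons, List.foldl_nil, ih]
    have hget : ((List.range (w + t)).map S).getD t d = S t := by
      rw [List.getD_eq_getElem?_getD]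
      simp [Nat.lt_add_left_iff_pos.mpr, hw]
    rw [hget, hS]
    have : w + (t + 1) = (w + t) + 1 := by omega
    rw [this, List.range_succ, List.map_append]
    simp [Nat.add_comm t w]

lemma growRowA_eq (w : Nat) (i : List Char) (hlen : i.length = w)
    (hdig : ∀ c ∈ i, c ∈ pvDigits) :
    growRowA w i = (List.range (5 * w)).map (fun p => DIG (idx9 (i.getD (p % w) ' ') + p / w)) := by
  rcases Nat.eq_zero_or_pos w with hw | hw
  · subst hw
    have : i = [] := List.eq_nil_of_length_eq_zero hlen
    subst this
    simp [growRowA, PySem.List.pyRange]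
  · set S : Nat → Char := fun p => DIG (idx9 (i.getD (p % w) ' ') + p / w) with hSdef
    have hi : i = (List.range w).map S := by
      apply List.ext_getElem
      · simp [hlen]
      · intro p hp hp2
        simp only [List.getElem_map, List.getElem_range, hSdef]
        rw [Nat.mod_eq_of_lt (by simpa [hlen] using hp), Nat.div_eq_of_lt (by simpa [hlen] using hp)]
        rw [List.getD_eq_getElem _ _ (by omega), Nat.add_zero, dig_idx]
        exact hdig _ (List.getElem_mem _)
    have hcast : ((w : Int)) * 4 = ((4 * w : Nat) : Int) := by push_cast; ring
    unfold growRowA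
    rw [hcast, PySem.List.pyRange_zero_nat, List.foldl_map]
    simp only [PySem.List.pyGetD_natCast]
    have hS : ∀ p, rotA (S p) = S (p + w) := by
      intro p
      simp only [hSdef]
      rw [rot_step, Nat.add_mod_right, Nat.add_div_right _ hw, Nat.add_assoc]
    have := chain_foldl ' ' rotA S w hw hS (4 * w)
    rw [hi]
    rw [show (fun (acc : List Char) (x : Nat) => acc ++ [lookupA.getD (acc.getD x ' ') ' '])
        = (fun acc k => acc ++ [rotA (acc.getD k ' ')]) from rfl]
    rw [this, show w + 4 * w = 5 * w from by omega]

-- the inner loop of A's second phase maps the wheel step over a finished row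
lemma inner_eq (w : Nat) (r : List Char) (hr : r.length = 5 * w) :
    (PySem.List.pyRange 0 ((w : Int) * 5) 1).foldl
      (fun i x => i ++ [rotA (PySem.List.pyGetD r x ' ')]) [] = r.map rotA := by
  have hcast : ((w : Int)) * 5 = PySem.List.len r := by
    simp [PySem.List.len_eq, hr]; ring
  rw [hcast]
  rw [PySem.List.foldl_pyRange_zero_pyGetD r ' ' (fun i c => i ++ [rotA c]) []]
  rw [PySem.List.foldl_append_singleton_eq_map]
  simp

-- A's second phase extends the canonical row stream RS from h rows to h + t rows
lemma vert_aux (RS : Nat → List Char) (h w : Nat) (hh : 0 < h)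
    (hlen : ∀ m, (RS m).length = 5 * w)
    (hstep : ∀ m, (RS m).map rotA = RS (m + h)) :
    ∀ t, ((List.range t).map (fun k : Nat => (k : Int))).foldl
      (fun acc k => acc ++
        [(PySem.List.pyRange 0 ((w : Int) * 5) 1).foldl
          (fun i x => i ++ [rotA (PySem.List.pyGetD (PySem.List.pyGetD acc k []) x ' ')]) []])
      ((List.range h).map RS)
      = (List.range (h + t)).map RS := by
  intro t
  induction t with
  | zero => simp
  | succ t ih =>
    rw [List.range_succ, List.map_append, List.foldl_append]
    simp only [List.map_cons, List.map_nil, List.foldl_cons, List.foldl_nil, ih]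
    have hget : PySem.List.pyGetD ((List.range (h + t)).map RS) ((t : Nat) : Int) [] = RS t := by
      rw [PySem.List.pyGetD_natCast]
      rw [List.getD_eq_getElem _ _ (by simp; omega)]
      simp
    rw [hget, inner_eq w (RS t) (hlen t), hstep]
    rw [show h + (t + 1) = (h + t) + 1 from by omega, List.range_succ, List.map_append]
    simp [Nat.add_comm t h]

lemma toList_getD (input : List String) (n : Nat) :
    (input.getD n "").toList = (input.map String.toList).getD n [] := by
  simp only [List.getD, List.getElem?_map]
  cases input[n]? <;> simp

lemma A_eq_canon (input : List String) (hpre : Pre_expandInput input) :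
    expandInput input =
      ((List.range (input.length + 4 * (PySem.List.pyGetD (input.map String.toList) 0 []).length)).map
        (fun m => String.ofList (rowS (input.map String.toList) input.length
          (PySem.List.pyGetD (input.map String.toList) 0 []).length m))) := by
  obtain ⟨hne, hrows⟩ := pre_unfold input hpre
  dsimp only [expandInput]
  set rows0 := input.map String.toList with hrows0
  set h := input.length with hhdef
  set w := (PySem.List.pyGetD rows0 0 []).length with hwdef
  have hh : 0 < h := by
    rw [hhdef]; exact List.length_pos_iff.mpr hne
  have hlen0 : rows0.length = h := by simp [hrows0, hhdef]
  have hrlen : ∀ m (hm : m < h), (rows0[m]'(by omega)).length = w := by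
    intro m hm
    have heq : rows0[m]'(by omega) = (input[m]'(by omega)).toList := by
      simp [hrows0]
    rw [heq, (hrows (input[m]'(by omega)) (List.getElem_mem _)).1, hwdef,
      PySem.List.pyGetD_zero, PySem.List.pyGetD_zero, toList_getD]
  have hrdig : ∀ m (hm : m < h), ∀ c ∈ (rows0[m]'(by omega)), c ∈ pvDigits := by
    intro m hm
    have heq : rows0[m]'(by omega) = (input[m]'(by omega)).toList := by
      simp [hrows0]
    rw [heq]
    exact (hrows (input[m]'(by omega)) (List.getElem_mem _)).2
  set RS : Nat → List Char := rowS rows0 h w with hRS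
  -- phase 1: the per-row loop gives the first h canonical rows
  have hnext1 : rows0.foldl (fun acc i => acc ++ [growRowA w i]) [] = (List.range h).map RS := by
    rw [PySem.List.foldl_append_singleton_eq_map, List.nil_append]
    apply List.ext_getElem
    · simp [hlen0]
    · intro m hm1 hm2
      have hmh : m < h := by simpa using hm2
      have hmr : m < rows0.length := by omega
      simp only [List.getElem_map, List.getElem_range]
      rw [growRowA_eq w _ (hrlen m hmh) (hrdig m hmh), hRS]
      unfold rowS
      apply List.map_congr_left
      intro p hp
      rw [Nat.mod_eq_of_lt hmh, Nat.div_eq_of_lt hmh, Nat.add_zero,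
        show rows0.getD m [] = rows0[m]'hmr from List.getD_eq_getElem _ _ hmr]
  -- properties of the canonical row stream
  have hlenRS : ∀ m, (RS m).length = 5 * w := by intro m; simp [hRS, rowS]
  have hstep : ∀ m, (RS m).map rotA = RS (m + h) := by
    intro m
    simp only [hRS]
    unfold rowS
    rw [List.map_map]
    apply List.map_congr_left
    intro p hp
    simp only [Function.comp_apply]
    rw [rot_step, Nat.add_mod_right, Nat.add_div_right _ hh]
    congr 1
    omega
  -- phase 2: the appended rows
  have hc4 : ((w : Int)) * 4 = ((4 * w : Nat) : Int) := by push_cast; ring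
  rw [hnext1, hc4, PySem.List.pyRange_zero_nat]
  simp only [show ∀ c, lookupA.getD c ' ' = rotA c from fun c => rfl]
  rw [vert_aux RS h w hh hlenRS hstep (4 * w), List.map_map]
  rfl

lemma B_eq_canon (input : List String) :
    expandInput_alt input =
      ((List.range (input.length + 4 * (PySem.List.pyGetD (input.map String.toList) 0 []).length)).map
        (fun m => String.ofList (rowS (input.map String.toList) input.length
          (PySem.List.pyGetD (input.map String.toList) 0 []).length m))) := by
  unfold expandInput_alt
  set h := input.length with hh
  set w := (PySem.List.pyGetD (input.map String.toList) 0 []).length with hwdef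
  have hw0 : (PySem.List.pyGetD input 0 "").toList.length = w := by
    rw [hwdef, PySem.List.pyGetD_zero, PySem.List.pyGetD_zero, toList_getD]
  simp only [hw0]
  have hc1 : (h : Int) + 4 * (w : Int) = ((h + 4 * w : Nat) : Int) := by push_cast; ring
  have hc2 : 5 * (w : Int) = ((5 * w : Nat) : Int) := by push_cast; ring
  rw [hc1, hc2, PySem.List.pyRange_zero_nat, PySem.List.pyRange_zero_nat, List.map_map]
  apply List.map_congr_left
  intro m hm
  simp only [Function.comp_apply]
  congr 1
  rw [List.map_map]
  unfold rowS
  apply List.map_congr_left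
  intro p hp
  simp only [Function.comp_apply, PySem.Int.mod_natCast, PySem.Int.floordiv_natCast,
    PySem.List.pyGetD_natCast]
  rw [toList_getD]
  set c := ((List.map String.toList input).getD (m % h) []).getD (p % w) ' ' with hc
  set x := (PySem.List.index? pvDigits c).getD 0 with hx
  have h9 : (9 : Int) = ((9 : Nat) : Int) := by norm_num
  rw [show ((x : Int) + ((m / h : Nat) : Int) + ((p / w : Nat) : Int))
      = ((x + m / h + p / w : Nat) : Int) from by push_cast; ring,
    h9, PySem.Int.mod_natCast, PySem.List.pyGetD_natCast]
  rfl

-- ===== VERDICT (by name: the statement is the Claim_ definition above) =====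
theorem expandInput_spec : Claim_equal_expandInput := by
  intro input _hdom hpre
  unfold Spec_expandInput
  rw [A_eq_canon input hpre, B_eq_canon input]
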